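-- pv_equiv track=rewrite | github.com/yongrenjie/genesis | old/initial_python/gen_argv.py | prettify_preamble
-- ===== SOURCE A (Python) =====
-- def split_prm(prm):
--     prml = prm.rstrip("1234567890")   # "cnst"
--     if prml == prm:                   # "td"
--         return (prml, 0)
--     else:
--         prmr = int(prm[len(prml):])   # 2
--         return (prml, prmr)
--
-- def prettify_preamble(combined_preambles):
--     """Arranges the preamble text in a much nicer way."""
--     lines = combined_preambles.split("\n")
--     # define *** lines can just be sorted alphabetically
--     definelines = [l for l in lines if l.startswith("define")]
--     definelines.sort()
--     # otherwise we need to sort by the variable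
--     notdefinelines = [l for l in lines if not l.startswith("define")]
--     def sort_preamble(line):
--         prm_name = line.split("=")[0].lstrip('"').strip()
--         return split_prm(prm_name)
--     notdefinelines.sort(key=sort_preamble)
--     # the manually defined delays need to go after the other params,
--     # because they depend on definitions of other params
--     DElines = [l for l in notdefinelines if l.startswith('"D')]
--     paramlines = [l for l in notdefinelines if not l.startswith('"D')]
--     # join them back together
--     lines = definelines + paramlines + DElines
--     return "\n".join(lines)
-- ===== SOURCE B (Python) =====
-- def prettify_preamble(combined_preambles):
--     """Arranges the preamble text in a much nicer way."""
--     # one stable sort with a composite key instead of three filters + two sorts: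
--     # group-encoding prefix char '0' (define lines) / '1' (params) / '2' (manual delays)
--     def key(line):
--         if line.startswith("define"):
--             return ("0" + line, 0)
--         name = line.split("=")[0].lstrip('"').strip()
--         stem = name.rstrip("1234567890")
--         num = 0 if stem == name else int(name[len(stem):])
--         prefix = "2" if line.startswith('"D') else "1"
--         return (prefix + stem, num)
--     return "\n".join(sorted(combined_preambles.split("\n"), key=key))
-- ===== Notes on version B (the rewrite author's own statement) =====
-- stated objective: simpler
-- what changed: A builds three filtered lists and runs two separate stable sorts (alphabetical for define lines, split_prm-keyed for the rest) and re-filters the sorted result; B performs one single stable sort of all lines under a composite key whose group-prefix character ('0' define / '1' param / '2' manual delay) makes the three groups come out in A's concatenation order.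
import Mathlib
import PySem

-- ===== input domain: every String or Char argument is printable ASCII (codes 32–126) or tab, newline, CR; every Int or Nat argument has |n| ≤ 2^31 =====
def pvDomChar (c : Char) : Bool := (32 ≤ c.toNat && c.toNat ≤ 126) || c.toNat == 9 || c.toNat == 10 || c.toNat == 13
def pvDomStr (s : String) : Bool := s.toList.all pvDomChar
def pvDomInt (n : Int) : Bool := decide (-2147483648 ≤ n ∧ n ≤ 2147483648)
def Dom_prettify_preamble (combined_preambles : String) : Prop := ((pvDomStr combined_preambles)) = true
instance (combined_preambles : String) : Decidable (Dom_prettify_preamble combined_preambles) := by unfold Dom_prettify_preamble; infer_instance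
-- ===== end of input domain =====

-- B replaces A's three filters and two separate stable sorts by ONE stable sort of all
-- lines under a composite key (objective: simpler / alternative decomposition).

-- shared low-level helpers: Python's s.rstrip(chars) / s.lstrip(chars) (exact on all inputs:
-- drop the maximal run of characters from `cs` at the right / left end)
def pvRstripChars (s : String) (cs : List Char) : String :=
  String.ofList ((s.toList.reverse.dropWhile (· ∈ cs)).reverse)

def pvLstripChars (s : String) (cs : List Char) : String :=
  String.ofList (s.toList.dropWhile (· ∈ cs))

def pvDigits : List Char := ['1', '2', '3', '4', '5', '6', '7', '8', '9', '0']

-- ===== PORT A =====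
-- split_prm(prm)
def pvSplitPrm (prm : String) : String × Int :=
  let prml := pvRstripChars prm pvDigits
  if prml = prm then (prml, 0)
  else
    -- int(prm[len(prml):]): the slice is a nonempty all-digit string, so ofStr? is
    -- always `some` there and the `getD 0` default is never used
    (prml, (PySem.Int.ofStr? (PySem.Str.slice prm (some (PySem.Str.len prml)) none)).getD 0)

-- sort_preamble(line); line.split("=") has nonempty separator, so split? is always `some`
-- and the result is nonempty: the getD/headD defaults are never used
def pvSortPreamble (line : String) : String × Int :=
  pvSplitPrm (PySem.Str.strip (pvLstripChars (((PySem.Str.split? line "=").getD []).headD "") ['"']))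

def prettify_preamble (combined_preambles : String) : String :=
  let lines := (PySem.Str.split? combined_preambles "\n").getD []   -- sep ≠ "", always some
  let definelines :=
    PySem.List.sorted (lines.filter (fun l => PySem.Str.startswith l "define")) (fun l => l) false
  let notdefinelines :=
    PySem.List.sorted2 (lines.filter (fun l => !PySem.Str.startswith l "define"))
      (fun l => (pvSortPreamble l).1) (fun l => (pvSortPreamble l).2) false
  let DElines := notdefinelines.filter (fun l => PySem.Str.startswith l "\"D")
  let paramlines := notdefinelines.filter (fun l => !PySem.Str.startswith l "\"D")
  PySem.Str.join "\n" (definelines ++ paramlines ++ DElines)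

-- ===== PORT B =====
-- the composite key of Source B: ("0"+line, 0) for define lines, else (prefix+stem, num)
-- with prefix "2" for manual delays and "1" for other params
def pvAltKey (line : String) : String × Int :=
  if PySem.Str.startswith line "define" then (String.ofList ('0' :: line.toList), 0)
  else
    let name := PySem.Str.strip (pvLstripChars (((PySem.Str.split? line "=").getD []).headD "") ['"'])
    let stem := pvRstripChars name pvDigits
    let num : Int := if stem = name then 0
      else (PySem.Int.ofStr? (PySem.Str.slice name (some (PySem.Str.len stem)) none)).getD 0
    let pre : Char := if PySem.Str.startswith line "\"D" then '2' else '1'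
    (String.ofList (pre :: stem.toList), num)

def prettify_preamble_alt (combined_preambles : String) : String :=
  PySem.Str.join "\n"
    (PySem.List.sorted2 ((PySem.Str.split? combined_preambles "\n").getD [])
      (fun l => (pvAltKey l).1) (fun l => (pvAltKey l).2) false)

-- ===== PRECONDITION & SPEC =====
def Spec_prettify_preamble (combined_preambles : String) (out : String) : Prop := out = prettify_preamble_alt combined_preambles
instance (combined_preambles : String) (out : String) : Decidable (Spec_prettify_preamble combined_preambles out) := by unfold Spec_prettify_preamble; infer_instance

-- ===== CLAIM (what is proved, stated in full; the proofs are below) =====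
def Claim_equal_prettify_preamble : Prop := ∀ (combined_preambles : String), Dom_prettify_preamble combined_preambles → Spec_prettify_preamble combined_preambles (prettify_preamble combined_preambles)

-- ===== LEMMAS AND PROOFS =====

-- insertBy unfolding equations
theorem pv_insertBy_nil {α : Type} (before : α → α → Bool) (x : α) :
    PySem.List.insertBy before x [] = [x] := rfl

theorem pv_insertBy_cons {α : Type} (before : α → α → Bool) (x y : α) (ys : List α) :
    PySem.List.insertBy before x (y :: ys) =
      if before x y then x :: y :: ys else y :: PySem.List.insertBy before x ys := rfl

-- inserting an element that goes strictly before everything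
theorem pv_insertBy_front {α : Type} (before : α → α → Bool) (x : α) (ys : List α)
    (h : ∀ y ∈ ys, before x y = true) :
    PySem.List.insertBy before x ys = x :: ys := by
  cases ys with
  | nil => rfl
  | cons y ys => rw [pv_insertBy_cons, h y (by simp)]; simp

theorem pv_insertBy_append_left {α : Type} (before : α → α → Bool) (x : α) (A B : List α)
    (h : ∀ b ∈ B, before x b = true) :
    PySem.List.insertBy before x (A ++ B) = PySem.List.insertBy before x A ++ B := by
  induction A with
  | nil => simp [pv_insertBy_front before x B h, pv_insertBy_nil]
  | cons a A ih =>
      simp only [List.cons_append, pv_insertBy_cons]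
      by_cases hxa : before x a = true
      · simp [hxa]
      · simp [hxa, ih]

theorem pv_insertBy_append_right {α : Type} (before : α → α → Bool) (x : α) (A B : List α)
    (h : ∀ a ∈ A, before x a = false) :
    PySem.List.insertBy before x (A ++ B) = A ++ PySem.List.insertBy before x B := by
  induction A with
  | nil => simp
  | cons a A ih =>
      simp only [List.cons_append, pv_insertBy_cons, h a (by simp)]
      simp only [Bool.false_eq_true, if_false, List.cons_inj_right]
      exact ih (fun a ha => h a (by simp [ha]))

-- the stable-sort fold splits along a predicate whose two classes are key-separated
theorem pv_foldl_split {α : Type} (before : α → α → Bool) (p : α → Bool)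
    (hlt : ∀ x y, p x = true → p y = false → before x y = true ∧ before y x = false)
    (xs A B : List α) (hA : ∀ a ∈ A, p a = true) (hB : ∀ b ∈ B, p b = false) :
    xs.foldl (fun acc x => PySem.List.insertBy before x acc) (A ++ B) =
      (xs.filter p).foldl (fun acc x => PySem.List.insertBy before x acc) A ++
      (xs.filter (fun x => !p x)).foldl (fun acc x => PySem.List.insertBy before x acc) B := by
  induction xs generalizing A B with
  | nil => simp
  | cons x xs ih =>
      by_cases hx : p x = true
      · simp only [List.foldl_cons, List.filter_cons, hx, if_pos]
        rw [pv_insertBy_append_left before x A B (fun b hb => (hlt x b hx (hB b hb)).1)]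
        rw [ih (PySem.List.insertBy before x A) B
          (fun a ha => by
            rcases (PySem.List.mem_insertBy before x a A).1 ha with h | h
            · exact h ▸ hx
            · exact hA a h) hB]
        simp
      · have hx' : p x = false := by simp at hx; exact hx
        simp only [List.foldl_cons, List.filter_cons, hx']
        rw [pv_insertBy_append_right before x A B (fun a ha => (hlt a x (hA a ha) hx').2)]
        rw [ih A (PySem.List.insertBy before x B) hA
          (fun b hb => by
            rcases (PySem.List.mem_insertBy before x b B).1 hb with h | h
            · exact h ▸ hx'
            · exact hB b h)]
        simp

theorem pv_sorted_split {α κ : Type} [LinearOrder κ] (key : α → κ) (p : α → Bool)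
    (hkey : ∀ x y, p x = true → p y = false → key x < key y) (xs : List α) :
    PySem.List.sorted xs key false =
      PySem.List.sorted (xs.filter p) key false ++
      PySem.List.sorted (xs.filter (fun x => !p x)) key false := by
  rw [PySem.List.sorted_eq_foldl_insertBy, PySem.List.sorted_eq_foldl_insertBy,
    PySem.List.sorted_eq_foldl_insertBy]
  have := pv_foldl_split (fun a b => decide (key a < key b)) p
    (fun x y hx hy => by
      constructor
      · simp [hkey x y hx hy]
      · simp [not_lt.2 (le_of_lt (hkey x y hx hy))])
    xs [] [] (by simp) (by simp)
  simpa using this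

-- insertBy with a key comparison keeps the accumulator sorted
theorem pv_pairwise_insertBy {α κ : Type} [LinearOrder κ] (key : α → κ) (x : α) (acc : List α)
    (h : acc.Pairwise (fun a b => key a ≤ key b)) :
    (PySem.List.insertBy (fun a b => decide (key a < key b)) x acc).Pairwise
      (fun a b => key a ≤ key b) := by
  induction acc with
  | nil => simp [pv_insertBy_nil]
  | cons a acc ih =>
      rw [pv_insertBy_cons]
      rcases List.pairwise_cons.1 h with ⟨ha, htail⟩
      by_cases hxa : key x < key a
      · simp only [hxa, decide_true, if_pos]
        refine List.pairwise_cons.2 ⟨?_, h⟩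
        intro b hb
        rcases List.mem_cons.1 hb with rfl | hb
        · exact le_of_lt hxa
        · exact le_trans (le_of_lt hxa) (ha b hb)
      · simp only [hxa, decide_false, Bool.false_eq_true, if_false]
        refine List.pairwise_cons.2 ⟨?_, ih htail⟩
        intro b hb
        rcases (PySem.List.mem_insertBy _ x b acc).1 hb with rfl | hb
        · exact not_lt.1 hxa
        · exact ha b hb

-- filtering commutes with one stable insertion into a sorted accumulator
theorem pv_filter_insertBy {α κ : Type} [LinearOrder κ] (key : α → κ) (q : α → Bool)
    (x : α) (acc : List α) (h : acc.Pairwise (fun a b => key a ≤ key b)) :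
    (PySem.List.insertBy (fun a b => decide (key a < key b)) x acc).filter q =
      if q x then PySem.List.insertBy (fun a b => decide (key a < key b)) x (acc.filter q)
      else acc.filter q := by
  induction acc with
  | nil => cases hq : q x <;> simp [pv_insertBy_nil, List.filter, hq]
  | cons a acc ih =>
      rw [pv_insertBy_cons]
      rcases List.pairwise_cons.1 h with ⟨ha, htail⟩
      by_cases hxa : key x < key a
      · simp only [hxa, decide_true, if_pos]
        by_cases hqx : q x = true
        · rw [List.filter_cons_of_pos hqx, if_pos hqx]
          rw [pv_insertBy_front _ x ((a :: acc).filter q)]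
          intro y hy
          rcases List.mem_filter.1 hy with ⟨hy, _⟩
          rcases List.mem_cons.1 hy with rfl | hy
          · simp [hxa]
          · simp [lt_of_lt_of_le hxa (ha y hy)]
        · have hqx' : q x = false := by simp at hqx; exact hqx
          rw [List.filter_cons_of_neg (by simp [hqx']), if_neg (by simp [hqx'])]
      · simp only [hxa, decide_false, Bool.false_eq_true, if_false]
        by_cases hqa : q a = true
        · rw [List.filter_cons_of_pos hqa, List.filter_cons_of_pos hqa, ih htail]
          by_cases hqx : q x = true
          · rw [if_pos hqx, if_pos hqx, pv_insertBy_cons]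
            simp [hxa]
          · simp at hqx
            rw [if_neg (by simp [hqx]), if_neg (by simp [hqx])]
        · have hqa' : q a = false := by simp at hqa; exact hqa
          rw [List.filter_cons_of_neg (by simp [hqa']), List.filter_cons_of_neg (by simp [hqa']),
            ih htail]

theorem pv_filter_foldl {α κ : Type} [LinearOrder κ] (key : α → κ) (q : α → Bool)
    (xs acc : List α) (h : acc.Pairwise (fun a b => key a ≤ key b)) :
    (xs.foldl (fun acc x => PySem.List.insertBy (fun a b => decide (key a < key b)) x acc)
        acc).filter q =
      (xs.filter q).foldl
        (fun acc x => PySem.List.insertBy (fun a b => decide (key a < key b)) x acc)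
        (acc.filter q) := by
  induction xs generalizing acc with
  | nil => simp
  | cons x xs ih =>
      simp only [List.foldl_cons, List.filter_cons]
      by_cases hqx : q x = true
      · simp only [hqx, if_pos, List.foldl_cons]
        rw [ih _ (pv_pairwise_insertBy key x acc h), pv_filter_insertBy key q x acc h, if_pos hqx]
      · have hqx' : q x = false := by simp at hqx; exact hqx
        simp only [hqx', Bool.false_eq_true, if_false]
        rw [ih _ (pv_pairwise_insertBy key x acc h), pv_filter_insertBy key q x acc h,
          if_neg (by simp [hqx'])]

theorem pv_filter_sorted {α κ : Type} [LinearOrder κ] (key : α → κ) (q : α → Bool) (xs : List α) :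
    (PySem.List.sorted xs key false).filter q = PySem.List.sorted (xs.filter q) key false := by
  rw [PySem.List.sorted_eq_foldl_insertBy, PySem.List.sorted_eq_foldl_insertBy]
  simpa using pv_filter_foldl key q xs [] (by simp)

-- congruence: two sorts agree when their comparisons agree on the list's members
theorem pv_insertBy_congr {α : Type} (before before' : α → α → Bool) (L : List α)
    (h : ∀ x ∈ L, ∀ y ∈ L, before x y = before' x y) (x : α) (hx : x ∈ L)
    (acc : List α) (hacc : ∀ a ∈ acc, a ∈ L) :
    PySem.List.insertBy before x acc = PySem.List.insertBy before' x acc := by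
  induction acc with
  | nil => rfl
  | cons a acc ih =>
      rw [pv_insertBy_cons, pv_insertBy_cons, h x hx a (hacc a (by simp)),
        ih (fun a ha => hacc a (by simp [ha]))]

theorem pv_foldl_congr {α : Type} (before before' : α → α → Bool) (L : List α)
    (h : ∀ x ∈ L, ∀ y ∈ L, before x y = before' x y) (xs : List α) (hxs : ∀ x ∈ xs, x ∈ L)
    (acc : List α) (hacc : ∀ a ∈ acc, a ∈ L) :
    xs.foldl (fun acc x => PySem.List.insertBy before x acc) acc =
      xs.foldl (fun acc x => PySem.List.insertBy before' x acc) acc := by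
  induction xs generalizing acc with
  | nil => rfl
  | cons x xs ih =>
      simp only [List.foldl_cons]
      rw [pv_insertBy_congr before before' L h x (hxs x (by simp)) acc hacc]
      exact ih (fun y hy => hxs y (by simp [hy])) _
        (fun a ha => by
          rcases (PySem.List.mem_insertBy before' x a acc).1 ha with rfl | ha
          · exact hxs a (by simp)
          · exact hacc a ha)

theorem pv_sorted_congr {α κ κ' : Type} [LinearOrder κ] [LinearOrder κ']
    (key : α → κ) (key' : α → κ') (xs : List α)
    (h : ∀ x ∈ xs, ∀ y ∈ xs, (key x < key y ↔ key' x < key' y)) :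
    PySem.List.sorted xs key false = PySem.List.sorted xs key' false := by
  rw [PySem.List.sorted_eq_foldl_insertBy, PySem.List.sorted_eq_foldl_insertBy]
  exact pv_foldl_congr _ _ xs (fun x hx y hy => decide_eq_decide.2 (h x hx y hy))
    xs (fun x hx => hx) [] (by simp)

-- sorted2 with keys into linear orders is sorted by the lexicographic pair key
theorem pv_sorted2_eq_sorted_lex {α κ₁ κ₂ : Type} [LinearOrder κ₁] [LinearOrder κ₂]
    (xs : List α) (k1 : α → κ₁) (k2 : α → κ₂) :
    PySem.List.sorted2 xs k1 k2 false =
      PySem.List.sorted xs (fun x => toLex (k1 x, k2 x)) false := by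
  show xs.foldl _ [] = xs.foldl _ []
  congr 1
  funext acc a
  congr 1
  funext x y
  show (decide (k1 x < k1 y) || !decide (k1 y < k1 x) && decide (k2 x < k2 y)) =
    decide (toLex (k1 x, k2 x) < toLex (k1 y, k2 y))
  rcases lt_trichotomy (k1 x) (k1 y) with h | h | h
  · simp [Prod.Lex.lt_iff, h]
  · simp [Prod.Lex.lt_iff, h]
  · simp [Prod.Lex.lt_iff, h, not_lt.2 (le_of_lt h), ne_of_gt h]

-- comparing keys with a common prefix character drops the prefix
theorem pv_consKey_lt (c : Char) (s₁ s₂ : String) (n₁ n₂ : Int) :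
    (toLex (String.ofList (c :: s₁.toList), n₁) < toLex (String.ofList (c :: s₂.toList), n₂)) ↔
      toLex (s₁, n₁) < toLex (s₂, n₂) := by
  have h1 : (String.ofList (c :: s₁.toList) < String.ofList (c :: s₂.toList)) ↔ s₁ < s₂ := by
    simp [List.cons_lt_cons_self]
  have h2 : (String.ofList (c :: s₁.toList) = String.ofList (c :: s₂.toList)) ↔ s₁ = s₂ := by
    simp [String.ofList_inj, String.toList_inj]
  rw [Prod.Lex.lt_iff, Prod.Lex.lt_iff]
  simp only [ofLex_toLex]
  rw [h1, h2]

-- key facts about pvAltKey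
theorem pv_altKey_def (l : String) (h : PySem.Str.startswith l "define" = true) :
    pvAltKey l = (String.ofList ('0' :: l.toList), 0) := by
  simp only [pvAltKey, h, if_true]

theorem pv_splitPrm_eq (p : String) :
    pvSplitPrm p = (pvRstripChars p pvDigits,
      if pvRstripChars p pvDigits = p then 0
      else (PySem.Int.ofStr? (PySem.Str.slice p
        (some (PySem.Str.len (pvRstripChars p pvDigits))) none)).getD 0) := by
  unfold pvSplitPrm
  split <;> simp_all

theorem pv_altKey_notdef (l : String) (h : PySem.Str.startswith l "define" = false) :
    pvAltKey l = (String.ofList ((if PySem.Str.startswith l "\"D" then '2' else '1') ::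
        (pvSortPreamble l).1.toList), (pvSortPreamble l).2) := by
  unfold pvAltKey pvSortPreamble
  rw [pv_splitPrm_eq]
  simp only [h, Bool.false_eq_true, if_false]

-- the first character of (pvAltKey l).1
theorem pv_altKey_head (l : String) :
    ∃ t, (pvAltKey l).1 = String.ofList
      ((if PySem.Str.startswith l "define" then '0'
        else if PySem.Str.startswith l "\"D" then '2' else '1') :: t) := by
  by_cases h : PySem.Str.startswith l "define" = true
  · exact ⟨l.toList, by simp only [pv_altKey_def l h, h, if_true]⟩
  · have h' : PySem.Str.startswith l "define" = false := by simp_all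
    exact ⟨(pvSortPreamble l).1.toList, by
      rw [pv_altKey_notdef l h']
      simp only [h', Bool.false_eq_true, if_false]⟩

theorem pv_altKey_lt_of_head_lt (x y : String)
    (h : (if PySem.Str.startswith x "define" then '0'
          else if PySem.Str.startswith x "\"D" then '2' else '1') <
         (if PySem.Str.startswith y "define" then '0'
          else if PySem.Str.startswith y "\"D" then '2' else '1')) :
    toLex (pvAltKey x) < toLex (pvAltKey y) := by
  rcases pv_altKey_head x with ⟨tx, hx⟩
  rcases pv_altKey_head y with ⟨ty, hy⟩
  rw [Prod.Lex.lt_iff]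
  left
  show (pvAltKey x).1 < (pvAltKey y).1
  rw [hx, hy]
  refine String.lt_iff_toList_lt.2 ?_
  rw [String.toList_ofList, String.toList_ofList]
  exact List.cons_lt_cons_iff.2 (Or.inl h)

-- a line starting with '"D' does not start with "define"
theorem pv_not_def_of_D (y : String) (h : PySem.Str.startswith y "\"D" = true) :
    PySem.Str.startswith y "define" = false := by
  by_contra hc
  have hc' : PySem.Str.startswith y "define" = true := by simp_all
  rw [PySem.Str.startswith_eq] at h hc'
  rcases (PySem.Chars.startswith_iff _ _).1 h with ⟨t, ht⟩
  rcases (PySem.Chars.startswith_iff _ _).1 hc' with ⟨u, hu⟩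
  have h2 : ("\"D" : String).toList = ['\"', 'D'] := rfl
  have h3 : ("define" : String).toList = ['d', 'e', 'f', 'i', 'n', 'e'] := rfl
  rw [h2] at ht; rw [h3] at hu
  rw [← ht] at hu
  simp at hu

-- cross-group key separation for B's composite key
theorem pv_sep_def (x y : String) (hx : PySem.Str.startswith x "define" = true)
    (hy : PySem.Str.startswith y "define" = false) :
    toLex ((pvAltKey x).1, (pvAltKey x).2) < toLex ((pvAltKey y).1, (pvAltKey y).2) := by
  apply pv_altKey_lt_of_head_lt
  rw [if_pos hx, if_neg (ne_true_of_eq_false hy)]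
  split <;> decide

theorem pv_sep_D (x y : String) (hx : PySem.Str.startswith x "\"D" = false)
    (hy : PySem.Str.startswith y "\"D" = true) :
    toLex ((pvAltKey x).1, (pvAltKey x).2) < toLex ((pvAltKey y).1, (pvAltKey y).2) := by
  apply pv_altKey_lt_of_head_lt
  have hydef : PySem.Str.startswith y "define" = false := pv_not_def_of_D y hy
  rw [if_neg (ne_true_of_eq_false hydef), if_pos hy, if_neg (ne_true_of_eq_false hx)]
  split <;> decide

-- on non-define lines with a common group prefix, B's key compares like A's split_prm key
theorem pv_piece (zs : List String) (c : Char)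
    (hnd : ∀ l ∈ zs, PySem.Str.startswith l "define" = false)
    (hc : ∀ l ∈ zs, (if PySem.Str.startswith l "\"D" then '2' else '1') = c) :
    PySem.List.sorted zs
      (fun l => toLex ((pvSortPreamble l).1, (pvSortPreamble l).2)) false =
    PySem.List.sorted zs (fun l => toLex ((pvAltKey l).1, (pvAltKey l).2)) false := by
  apply pv_sorted_congr
  intro x hx y hy
  rw [pv_altKey_notdef x (hnd x hx), pv_altKey_notdef y (hnd y hy), hc x hx, hc y hy]
  rw [pv_consKey_lt]

theorem pv_main (s : String) : prettify_preamble s = prettify_preamble_alt s := by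
  simp only [prettify_preamble, prettify_preamble_alt]
  rw [pv_sorted2_eq_sorted_lex, pv_sorted2_eq_sorted_lex]
  -- split B's single sort at the define / not-define boundary, then params / manual delays
  rw [pv_sorted_split (fun l => toLex ((pvAltKey l).1, (pvAltKey l).2))
      (fun l => PySem.Str.startswith l "define") pv_sep_def]
  rw [pv_sorted_split (fun l => toLex ((pvAltKey l).1, (pvAltKey l).2))
      (fun l => !PySem.Str.startswith l "\"D")
      (fun x y hx hy => pv_sep_D x y (by simpa using hx) (by simpa using hy))
      (List.filter (fun l => !PySem.Str.startswith l "define")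
        ((PySem.Str.split? s "\n").getD []))]
  -- push A's two filters inside its sort of the non-define lines
  rw [pv_filter_sorted, pv_filter_sorted]
  simp only [Bool.not_not]
  refine congrArg (PySem.Str.join "\n") ?_
  -- piece 1: on define lines B's key sorts like the identity
  have e1 : PySem.List.sorted
      (List.filter (fun l => PySem.Str.startswith l "define")
        ((PySem.Str.split? s "\n").getD [])) (fun l => l) false =
      PySem.List.sorted
      (List.filter (fun l => PySem.Str.startswith l "define")
        ((PySem.Str.split? s "\n").getD []))
      (fun l => toLex ((pvAltKey l).1, (pvAltKey l).2)) false := by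
    apply pv_sorted_congr
    intro x hx y hy
    rw [pv_altKey_def x (List.mem_filter.1 hx).2, pv_altKey_def y (List.mem_filter.1 hy).2,
      pv_consKey_lt, Prod.Lex.lt_iff]
    simp
  -- pieces 2 and 3: params ('1') and manual delays ('2')
  have e2 := pv_piece
    (List.filter (fun l => !PySem.Str.startswith l "\"D")
      (List.filter (fun l => !PySem.Str.startswith l "define")
        ((PySem.Str.split? s "\n").getD []))) '1'
    (fun l hl => by simpa using (List.mem_filter.1 (List.mem_filter.1 hl).1).2)
    (fun l hl => by rw [if_neg]; simpa using (List.mem_filter.1 hl).2)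
  have e3 := pv_piece
    (List.filter (fun l => PySem.Str.startswith l "\"D")
      (List.filter (fun l => !PySem.Str.startswith l "define")
        ((PySem.Str.split? s "\n").getD []))) '2'
    (fun l hl => pv_not_def_of_D l (List.mem_filter.1 hl).2)
    (fun l hl => by rw [if_pos (List.mem_filter.1 hl).2])
  rw [e1, e2, e3, List.append_assoc]

-- ===== VERDICT (by name: the statement is the Claim_ definition above) =====
theorem prettify_preamble_spec : Claim_equal_prettify_preamble := by
  intro s _
  unfold Spec_prettify_preamble
  exact pv_main s
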